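-- pv_equiv track=rewrite | github.com/pypi-data/pypi-mirror-183 | packages/insight-extractor-package/insight_extractor_package-0.0.7-py3-none-any.whl/TakeBlipInsightExtractor/visualization/entity_hierarchy.py | create_parent_dict
-- ===== SOURCE A (Python) =====
-- def create_parent_dict(entity_frequency_dict: dict,
--                        entity_cluster_dict: dict) -> dict:
--     """Create the dictionaries for entity - cluster name
--
--     Receive one dictionary with the frequency of each entity (entity as key
--     and frequency as value) and one dictionary with the cluster id (entity
--     as key and cluster id as values). And create two dictionaries:
--
--     * Entities_parent_dictionary: dictionary with the relation of entity
--     and cluster name (parent). Entity as key and cluster name as value.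
--
--     * Parent_entities_dictionary: dictionary with the relation of cluster
--     name(parent) and all entities in the cluster. Cluster name as key and
--     list with all entities as value.
--
--     Parameters
--     ----------
--     entity_frequency_dict: dict
--        dictionary entity as key and frequency as value.
--     entity_cluster_dict: dict
--         dictionary entity as key and cluster id as value.
--
--     Returns
--     -------
--     dict
--         Dictionary with the relation parent - entities
--     """
--     parent_entity_dict = {}
--
--     num_clusters = max(entity_cluster_dict.values()) + 1
--
--     cluster_name = {}
--
--     for entity, cluster in entity_cluster_dict.items():
--         if parent_entity_dict.get(cluster, None):
--             cluster_freq = entity_frequency_dict[cluster_name[cluster]]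
--             parent_entity_dict[cluster].append(entity)
--             if entity_frequency_dict[entity] > cluster_freq:
--                 cluster_name.update({cluster: entity})
--         else:
--             parent_entity_dict[cluster] = [entity]
--             cluster_name[cluster] = entity
--
--     for k in range(num_clusters):
--         parent_cluster = cluster_name[k]
--         parent_entity_dict[parent_cluster] = parent_entity_dict.pop(k)
--
--     return parent_entity_dict
-- ===== SOURCE B (Python) =====
-- def create_parent_dict(entity_frequency_dict: dict,
--                        entity_cluster_dict: dict) -> dict:
--     """Two-pass rewrite: group entities per cluster first, then pick each
--     cluster's parent with an explicit running argmax and emit the result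
--     keyed by parent in cluster-id order."""
--     num_clusters = max(entity_cluster_dict.values()) + 1
--
--     groups = {}
--     for entity, cluster in entity_cluster_dict.items():
--         groups.setdefault(cluster, []).append(entity)
--
--     result = {}
--     for k in range(num_clusters):
--         entities = groups[k]
--         parent = entities[0]
--         for e in entities[1:]:
--             if entity_frequency_dict[e] > entity_frequency_dict[parent]:
--                 parent = e
--         result[parent] = entities
--     return result
-- ===== Notes on version B (the rewrite author's own statement) =====
-- stated objective: simpler
-- what changed: Replaces A's single interleaved pass that maintains a running champion dict plus a final pop-and-reinsert rekeying loop with two plain passes: group entities per cluster with setdefault, then for each cluster id in range pick the parent by an explicit strict-greater running argmax and build the result directly keyed by parent.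
-- outside the precondition, e.g. on create_parent_dict({'a': 1}, {'a': -1}): A returns {-1: ['a']}, B returns {}
import Mathlib
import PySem

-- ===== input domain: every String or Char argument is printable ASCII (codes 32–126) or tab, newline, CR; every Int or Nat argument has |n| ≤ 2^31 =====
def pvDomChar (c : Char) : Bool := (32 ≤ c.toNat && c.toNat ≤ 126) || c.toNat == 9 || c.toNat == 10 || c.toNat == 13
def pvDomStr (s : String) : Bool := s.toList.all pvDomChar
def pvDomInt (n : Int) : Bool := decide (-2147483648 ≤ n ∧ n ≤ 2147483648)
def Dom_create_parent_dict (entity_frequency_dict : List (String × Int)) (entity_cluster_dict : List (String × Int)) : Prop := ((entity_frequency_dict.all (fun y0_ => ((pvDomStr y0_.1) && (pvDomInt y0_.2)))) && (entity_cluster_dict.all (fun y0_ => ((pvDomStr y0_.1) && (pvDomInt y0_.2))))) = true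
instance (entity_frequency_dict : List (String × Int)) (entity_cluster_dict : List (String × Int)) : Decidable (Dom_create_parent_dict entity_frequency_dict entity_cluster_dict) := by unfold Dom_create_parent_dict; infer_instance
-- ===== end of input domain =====

-- B replaces A's interleaved champion-tracking pass plus pop-and-reinsert rekeying loop by two
-- plain passes (group per cluster, then explicit running argmax per cluster id); objective: simpler.
-- A mutates nothing observable; equivalence is about the return value.


-- ===== PORT A =====
-- A's working dict mixes int keys (cluster ids) with str keys (parent names); we embed both
-- injectively into one key type: int c ↦ (true, c, ""), str s ↦ (false, 0, s).
abbrev pvK : Type := Bool × Int × String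

def pvKeyI (c : Int) : pvK := (true, c, "")
def pvKeyS (s : String) : pvK := (false, 0, s)

-- entity_frequency_dict[e]; the default 0 is only reached where Python raises KeyError (outside Pre_)
def pvFreq (efd : List (String × Int)) (e : String) : Int :=
  ((PySem.Dict.mk efd).get? e).getD 0

-- max(entity_cluster_dict.values()) + 1 (both Pythons compute this; getD (-1) only reached where
-- Python raises ValueError on an empty dict, outside Pre_)
def pvNumClusters (ecd : List (String × Int)) : Int :=
  (PySem.List.max? (ecd.map Prod.snd) (fun v => v)).getD (-1) + 1

-- one iteration of A's first loop over entity_cluster_dict.items()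
def pvStepA (efd : List (String × Int))
    (st : PySem.Dict pvK (List String) × PySem.Dict Int String)
    (p : String × Int) : PySem.Dict pvK (List String) × PySem.Dict Int String :=
  if (st.1.get? (pvKeyI p.2)).getD [] ≠ [] then   -- truthiness of .get(cluster, None): some nonempty list
    let clusterFreq := pvFreq efd (st.2.getD p.2 "")
    (st.1.modify (pvKeyI p.2) [] (fun l => l ++ [p.1]),
     if pvFreq efd p.1 > clusterFreq then st.2.insert p.2 p.1 else st.2)
  else
    (st.1.insert (pvKeyI p.2) [p.1], st.2.insert p.2 p.1)

-- one iteration of A's second loop: parent_entity_dict[cluster_name[k]] = parent_entity_dict.pop(k)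
-- (the none branch is Python's KeyError, outside Pre_; cn.getD k "" likewise)
def pvPopReinsert (cn : PySem.Dict Int String)
    (d : PySem.Dict pvK (List String)) (k : Int) : PySem.Dict pvK (List String) :=
  match d.pop? (pvKeyI k) with
  | some (v, d') => d'.insert (pvKeyS (cn.getD k "")) v
  | none => d

def create_parent_dict (entity_frequency_dict : List (String × Int)) (entity_cluster_dict : List (String × Int)) : List (String × List String) :=
  let st := entity_cluster_dict.foldl (pvStepA entity_frequency_dict) (PySem.Dict.empty, PySem.Dict.empty)
  let fin := (PySem.List.pyRange 0 (pvNumClusters entity_cluster_dict) 1).foldl (pvPopReinsert st.2) st.1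
  -- after the second loop every key is a str key (false, 0, s); unembed it
  fin.items.map (fun q => (q.1.2.2, q.2))

-- ===== PORT B =====
-- parent = entities[0]; for e in entities[1:]: if freq[e] > freq[parent]: parent = e
def pvArgmax (efd : List (String × Int)) (entities : List String) : String :=
  (PySem.List.slice entities (some 1) none).foldl
    (fun par e => if pvFreq efd e > pvFreq efd par then e else par)
    (PySem.List.pyGetD entities 0 "")

def create_parent_dict_alt (entity_frequency_dict : List (String × Int)) (entity_cluster_dict : List (String × Int)) : List (String × List String) :=
  let groups := entity_cluster_dict.foldl
    (fun g (p : String × Int) => g.modify p.2 [] (fun l => l ++ [p.1]))   -- setdefault(c, []).append(e)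
    PySem.Dict.empty
  ((PySem.List.pyRange 0 (pvNumClusters entity_cluster_dict) 1).foldl (fun r k =>
      let entities := (groups.get? k).getD []   -- groups[k]; KeyError outside Pre_
      r.insert (pvArgmax entity_frequency_dict entities) entities)
    PySem.Dict.empty).items

-- ===== PRECONDITION & SPEC =====
-- Pre_ excludes: inputs where Python A raises (empty cluster dict → ValueError on max(); a cluster id
-- in 0..max with no entity → KeyError; an entity of a shared cluster missing from the frequency dict
-- → KeyError); inputs with a negative cluster id, on which A returns a dict that keeps integer keys
-- and so is no value of the declared str-keyed type; and association lists with duplicate keys,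
-- which do not represent a Python dict.
def Pre_create_parent_dict (entity_frequency_dict : List (String × Int)) (entity_cluster_dict : List (String × Int)) : Prop :=
  (entity_cluster_dict.map Prod.fst).Nodup ∧
  entity_cluster_dict ≠ [] ∧
  (∀ p ∈ entity_cluster_dict, 0 ≤ p.2) ∧
  (∀ k ∈ List.range (((entity_cluster_dict.map Prod.snd).foldl max 0).toNat + 1),
      (k : Int) ∈ entity_cluster_dict.map Prod.snd) ∧
  (∀ p ∈ entity_cluster_dict, 2 ≤ (entity_cluster_dict.map Prod.snd).count p.2 →
      p.1 ∈ entity_frequency_dict.map Prod.fst)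

instance (entity_frequency_dict : List (String × Int)) (entity_cluster_dict : List (String × Int)) : Decidable (Pre_create_parent_dict entity_frequency_dict entity_cluster_dict) := by
  unfold Pre_create_parent_dict; infer_instance

def pvWitness_create_parent_dict : (List (String × Int)) × (List (String × Int)) :=
  ([("a", 2), ("b", 3)], [("a", 0), ("b", 0)])

def Spec_create_parent_dict (entity_frequency_dict : List (String × Int)) (entity_cluster_dict : List (String × Int)) (out : List (String × List String)) : Prop := out = create_parent_dict_alt entity_frequency_dict entity_cluster_dict
instance (entity_frequency_dict : List (String × Int)) (entity_cluster_dict : List (String × Int)) (out : List (String × List String)) : Decidable (Spec_create_parent_dict entity_frequency_dict entity_cluster_dict out) := by unfold Spec_create_parent_dict; infer_instance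

-- ===== CLAIM (what is proved, stated in full; the proofs are below) =====
def Claim_equal_create_parent_dict : Prop := ∀ (entity_frequency_dict : List (String × Int)) (entity_cluster_dict : List (String × Int)), Dom_create_parent_dict entity_frequency_dict entity_cluster_dict → Pre_create_parent_dict entity_frequency_dict entity_cluster_dict → Spec_create_parent_dict entity_frequency_dict entity_cluster_dict (create_parent_dict entity_frequency_dict entity_cluster_dict)

-- ===== LEMMAS AND PROOFS =====

-- entities with cluster c, in insertion order
def pvGrp (ecd : List (String × Int)) (c : Int) : List String :=
  (ecd.filter (fun p => p.2 == c)).map Prod.fst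

-- distinct cluster ids in first-seen order
def pvCK (ecd : List (String × Int)) : List Int :=
  PySem.Set.ofList (ecd.map Prod.snd)

theorem pvArgmax_eq (efd : List (String × Int)) (xs : List String) :
    pvArgmax efd xs = (xs.drop 1).foldl
      (fun par e => if pvFreq efd e > pvFreq efd par then e else par) (xs.headD "") := by
  cases xs <;> simp [pvArgmax, PySem.List.slice, PySem.List.clampIdx, PySem.List.pyGetD_zero]

theorem pvArgmax_singleton (efd : List (String × Int)) (e : String) :
    pvArgmax efd [e] = e := by
  simp [pvArgmax_eq]

theorem pvArgmax_append (efd : List (String × Int)) (xs : List String) (e : String) (h : xs ≠ []) :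
    pvArgmax efd (xs ++ [e]) =
      if pvFreq efd e > pvFreq efd (pvArgmax efd xs) then e else pvArgmax efd xs := by
  cases xs with
  | nil => simp at h
  | cons a t => simp [pvArgmax_eq, List.foldl_append]

theorem pvArgmax_mem (efd : List (String × Int)) (xs : List String) (h : xs ≠ []) :
    pvArgmax efd xs ∈ xs := by
  induction xs using List.reverseRecOn with
  | nil => simp at h
  | append_singleton t a ih =>
    rcases List.eq_nil_or_concat t with rfl | _
    · simp [pvArgmax_singleton]
    · rw [pvArgmax_append efd t a (by rintro rfl; simp_all)]
      split
      · simp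
      · exact List.mem_append_left _ (ih (by rintro rfl; simp_all))

theorem pvGrp_append (l : List (String × Int)) (p : String × Int) (c : Int) :
    pvGrp (l ++ [p]) c = if p.2 = c then pvGrp l c ++ [p.1] else pvGrp l c := by
  simp [pvGrp, List.filter_append]
  split <;> simp_all

theorem pvGrp_ne_nil_iff (l : List (String × Int)) (c : Int) :
    pvGrp l c ≠ [] ↔ c ∈ l.map Prod.snd := by
  simp only [pvGrp, ne_eq, List.map_eq_nil_iff, List.filter_eq_nil_iff, List.mem_map]
  push_neg
  constructor
  · rintro ⟨p, hp, hc⟩; exact ⟨p, hp, by simpa using hc⟩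
  · rintro ⟨p, hp, hc⟩; exact ⟨p, hp, by simpa using hc⟩

theorem pvMem_grp (l : List (String × Int)) (c : Int) (x : String) (h : x ∈ pvGrp l c) :
    (x, c) ∈ l := by
  simp only [pvGrp, List.mem_map] at h
  rcases h with ⟨q, hq, rfl⟩
  rcases List.mem_filter.mp hq with ⟨hmem, hc⟩
  simp only [beq_iff_eq] at hc
  rw [← hc]
  simpa using hmem

theorem pvCK_mem (l : List (String × Int)) (c : Int) :
    c ∈ pvCK l ↔ c ∈ l.map Prod.snd := by
  simp [pvCK, PySem.Set.mem_ofList]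

theorem pvCK_append (l : List (String × Int)) (p : String × Int) :
    pvCK (l ++ [p]) = if p.2 ∈ l.map Prod.snd then pvCK l else pvCK l ++ [p.2] := by
  simp [pvCK, PySem.Set.ofList, PySem.Set.add]
  split <;> rename_i h
  · rw [if_pos]; simpa [← PySem.Set.mem_ofList (l.map Prod.snd) p.2, PySem.Set.ofList] using h
  · rw [if_neg]; simpa [← PySem.Set.mem_ofList (l.map Prod.snd) p.2, PySem.Set.ofList] using h

theorem pvFind_keyI {ν : Type} (S : List Int) (g : Int → ν) (x : Int) :
    (S.map (fun c => (pvKeyI c, g c))).find? (fun q => q.1 == pvKeyI x)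
      = if x ∈ S then some (pvKeyI x, g x) else none := by
  induction S with
  | nil => simp
  | cons a t ih =>
    by_cases hax : a = x
    · subst hax; simp [List.find?]
    · rw [List.map_cons, List.find?_cons_of_neg, ih]
      · simp [hax, Ne.symm hax]
      · simp [pvKeyI, hax]

theorem pvFind_int {ν : Type} (S : List Int) (g : Int → ν) (x : Int) :
    (S.map (fun c => (c, g c))).find? (fun q => q.1 == x)
      = if x ∈ S then some (x, g x) else none := by
  induction S with
  | nil => simp
  | cons a t ih =>
    by_cases hax : a = x
    · subst hax; simp [List.find?]
    · rw [List.map_cons, List.find?_cons_of_neg, ih]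
      · simp [hax, Ne.symm hax]
      · simp [hax]

theorem pvGet_keyI {ν : Type} (S : List Int) (g : Int → ν) (x : Int) :
    (PySem.Dict.mk (S.map (fun c => (pvKeyI c, g c)))).get? (pvKeyI x)
      = if x ∈ S then some (g x) else none := by
  simp only [PySem.Dict.get?, PySem.Dict.items, pvFind_keyI]
  split <;> simp

theorem pvGet_int {ν : Type} (S : List Int) (g : Int → ν) (x : Int) :
    (PySem.Dict.mk (S.map (fun c => (c, g c)))).get? x
      = if x ∈ S then some (g x) else none := by
  simp only [PySem.Dict.get?, PySem.Dict.items, pvFind_int]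
  split <;> simp

theorem pvContains_keyI {ν : Type} (S : List Int) (g : Int → ν) (x : Int) :
    (PySem.Dict.mk (S.map (fun c => (pvKeyI c, g c)))).contains (pvKeyI x)
      = decide (x ∈ S) := by
  rw [PySem.Dict.contains_eq_isSome_get?, pvGet_keyI]
  split <;> simp_all

theorem pvContains_int {ν : Type} (S : List Int) (g : Int → ν) (x : Int) :
    (PySem.Dict.mk (S.map (fun c => (c, g c)))).contains x = decide (x ∈ S) := by
  rw [PySem.Dict.contains_eq_isSome_get?, pvGet_int]
  split <;> simp_all

theorem pvInsert_keyI {ν : Type} (S : List Int) (g : Int → ν) (x : Int) (v : ν) (hx : x ∈ S) :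
    ((PySem.Dict.mk (S.map (fun c => (pvKeyI c, g c)))).insert (pvKeyI x) v).items
      = S.map (fun c => (pvKeyI c, if c = x then v else g c)) := by
  rw [PySem.Dict.items_insert]
  rw [pvContains_keyI]
  simp only [hx, decide_true, if_true, List.map_map]
  apply List.map_congr_left
  intro c _
  by_cases hcx : c = x <;> simp [pvKeyI, hcx]

theorem pvInsert_int {ν : Type} (S : List Int) (g : Int → ν) (x : Int) (v : ν) (hx : x ∈ S) :
    ((PySem.Dict.mk (S.map (fun c => (c, g c)))).insert x v).items
      = S.map (fun c => (c, if c = x then v else g c)) := by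
  rw [PySem.Dict.items_insert, pvContains_int]
  simp only [hx, decide_true, if_true, List.map_map]
  apply List.map_congr_left
  intro c _
  by_cases hcx : c = x <;> simp [hcx]

theorem pvPhase1 (efd : List (String × Int)) (l : List (String × Int)) :
    (l.foldl (pvStepA efd) (PySem.Dict.empty, PySem.Dict.empty)).1.items
        = (pvCK l).map (fun c => (pvKeyI c, pvGrp l c))
    ∧ (l.foldl (pvStepA efd) (PySem.Dict.empty, PySem.Dict.empty)).2.items
        = (pvCK l).map (fun c => (c, pvArgmax efd (pvGrp l c))) := by
  induction l using List.reverseRecOn with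
  | nil => simp [pvCK, PySem.Set.ofList, PySem.Dict.empty]
  | append_singleton t p ih =>
    obtain ⟨h1, h2⟩ := ih
    rw [List.foldl_append, List.foldl_cons, List.foldl_nil]
    rcases hst : t.foldl (pvStepA efd) (PySem.Dict.empty, PySem.Dict.empty) with ⟨d1, d2⟩
    rw [hst] at h1 h2
    simp only [] at h1 h2
    have e1 : d1 = PySem.Dict.mk ((pvCK t).map (fun c => (pvKeyI c, pvGrp t c))) :=
      PySem.Dict.ext h1
    have e2 : d2 = PySem.Dict.mk ((pvCK t).map (fun c => (c, pvArgmax efd (pvGrp t c)))) :=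
      PySem.Dict.ext h2
    simp only [pvStepA]
    by_cases hc : p.2 ∈ t.map Prod.snd
    · -- cluster already seen
      have hckm : p.2 ∈ pvCK t := (pvCK_mem t p.2).mpr hc
      have hne : pvGrp t p.2 ≠ [] := (pvGrp_ne_nil_iff t p.2).mpr hc
      have hcond : (d1.get? (pvKeyI p.2)).getD [] ≠ [] := by
        rw [e1, pvGet_keyI]; simpa [hckm] using hne
      have hchamp : d2.getD p.2 "" = pvArgmax efd (pvGrp t p.2) := by
        rw [e2, PySem.Dict.getD_eq_get?_getD, pvGet_int]; simp [hckm]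
      rw [if_pos hcond]
      constructor
      · -- parent_entity_dict side
        show (d1.modify (pvKeyI p.2) [] (fun l => l ++ [p.1])).items = _
        rw [PySem.Dict.modify, PySem.Dict.getD_eq_get?_getD]
        conv_lhs => rw [e1]
        rw [pvGet_keyI]
        simp only [hckm, if_true, Option.getD_some]
        rw [pvInsert_keyI _ _ _ _ hckm, pvCK_append, if_pos hc]
        apply List.map_congr_left
        intro c hcmem
        rw [pvGrp_append]
        by_cases hcx : c = p.2
        · simp [hcx]
        · simp [hcx, Ne.symm hcx]
      · -- cluster_name side
        show (if pvFreq efd p.1 > pvFreq efd (d2.getD p.2 "") then d2.insert p.2 p.1 else d2).items = _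
        rw [hchamp, pvCK_append, if_pos hc]
        by_cases hgt : pvFreq efd p.1 > pvFreq efd (pvArgmax efd (pvGrp t p.2))
        · rw [if_pos hgt]
          conv_lhs => rw [e2]
          rw [pvInsert_int _ _ _ _ hckm]
          apply List.map_congr_left
          intro c hcmem
          rw [pvGrp_append]
          by_cases hcx : c = p.2
          · simp only [hcx, if_pos rfl, if_true]
            rw [pvArgmax_append efd _ _ hne, if_pos hgt]
          · simp [hcx, Ne.symm hcx]
        · rw [if_neg hgt, h2]
          apply List.map_congr_left
          intro c hcmem
          rw [pvGrp_append]
          by_cases hcx : c = p.2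
          · simp only [hcx, if_pos rfl, if_true]
            rw [pvArgmax_append efd _ _ hne, if_neg hgt]
          · simp [Ne.symm hcx]
    · -- new cluster
      have hckm : p.2 ∉ pvCK t := fun h => hc ((pvCK_mem t p.2).mp h)
      have hnil : pvGrp t p.2 = [] := by
        by_contra h; exact hc ((pvGrp_ne_nil_iff t p.2).mp h)
      have hcond : ¬ (d1.get? (pvKeyI p.2)).getD [] ≠ [] := by
        rw [e1, pvGet_keyI]; simp [hckm]
      rw [if_neg hcond]
      constructor
      · show (d1.insert (pvKeyI p.2) [p.1]).items = _
        conv_lhs => rw [e1]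
        rw [PySem.Dict.items_insert_of_not_contains _ _ (by rw [pvContains_keyI]; simp [hckm]),
            pvCK_append, if_neg hc]
        rw [List.map_append]
        congr 1
        · apply List.map_congr_left
          intro c hcmem
          rw [pvGrp_append, if_neg]
          intro h; exact hc (h ▸ (pvCK_mem t c).mp hcmem)
        · simp [pvGrp_append, hnil]
      · show (d2.insert p.2 p.1).items = _
        conv_lhs => rw [e2]
        rw [PySem.Dict.items_insert_of_not_contains _ _ (by rw [pvContains_int]; simp [hckm]),
            pvCK_append, if_neg hc]
        rw [List.map_append]
        congr 1
        · apply List.map_congr_left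
          intro c hcmem
          rw [pvGrp_append, if_neg]
          intro h; exact hc (h ▸ (pvCK_mem t c).mp hcmem)
        · simp [pvGrp_append, hnil, pvArgmax_singleton]

theorem pvFoldlMax_le (xs : List Int) (a m : Int) (ha : a ≤ m) (h : ∀ y ∈ xs, y ≤ m) :
    xs.foldl max a ≤ m := by
  induction xs generalizing a with
  | nil => simpa using ha
  | cons b t ih =>
    rw [List.foldl_cons]
    exact ih (max a b) (max_le ha (h b (by simp))) (fun y hy => h y (by simp [hy]))

-- the max? the ports compute is the foldl max 0 the precondition talks about

theorem pvNum_eq (xs : List Int) (hne : xs ≠ []) (hnn : ∀ y ∈ xs, 0 ≤ y) :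
    (PySem.List.max? xs (fun v => v)).getD (-1) = xs.foldl max 0 := by
  cases hm : PySem.List.max? xs (fun v => v) with
  | none => exact absurd ((PySem.List.max?_eq_none_iff xs _).mp hm) hne
  | some m =>
    have hmem := PySem.List.max?_mem hm
    have hmax := PySem.List.max?_isMax hm
    have h1 : xs.foldl max 0 ≤ m := pvFoldlMax_le xs 0 m (hnn m hmem) hmax
    have h2 : m ≤ xs.foldl max 0 := (PySem.List.le_foldl_max xs 0).2 m hmem
    simp [le_antisymm h1 h2]

-- an entity determines its cluster when the cluster dict's keys are distinct

theorem pvCluster_unique (ecd : List (String × Int)) (hnd : (ecd.map Prod.fst).Nodup)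
    {x : String} {c c' : Int} (h1 : (x, c) ∈ ecd) (h2 : (x, c') ∈ ecd) : c = c' := by
  have := List.inj_on_of_nodup_map hnd h1 h2 rfl
  exact congrArg Prod.snd this

theorem pvParent_ne (efd ecd : List (String × Int)) (hnd : (ecd.map Prod.fst).Nodup)
    {j k : Int} (hjk : j ≠ k)
    (hj : pvGrp ecd j ≠ []) (hk : pvGrp ecd k ≠ []) :
    pvArgmax efd (pvGrp ecd j) ≠ pvArgmax efd (pvGrp ecd k) := by
  intro he
  have h1 := pvMem_grp ecd j _ (pvArgmax_mem efd _ hj)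
  have h2 := pvMem_grp ecd k _ (pvArgmax_mem efd _ hk)
  rw [he] at h1
  exact hjk (pvCluster_unique ecd hnd h1 h2)

-- phase-2 invariant: after rekeying clusters 0..j-1, the unprocessed groups (in first-seen
-- order) are followed by the rekeyed ones (in cluster-id order)

theorem pvPhase2 (efd ecd : List (String × Int)) (hnd : (ecd.map Prod.fst).Nodup)
    (N : Nat) (hcov : ∀ k : Nat, k < N → (k : Int) ∈ ecd.map Prod.snd)
    (hnn : ∀ c ∈ ecd.map Prod.snd, 0 ≤ c)
    (j : Nat) (hj : j ≤ N) :
    ((List.range j).foldl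
        (fun d (k : Nat) => pvPopReinsert
          (PySem.Dict.mk ((pvCK ecd).map (fun c => (c, pvArgmax efd (pvGrp ecd c))))) d (k : Int))
        (PySem.Dict.mk ((pvCK ecd).map (fun c => (pvKeyI c, pvGrp ecd c))))).items
      = ((pvCK ecd).filter (fun c => decide ((j : Int) ≤ c))).map
          (fun c => (pvKeyI c, pvGrp ecd c))
        ++ (List.range j).map
          (fun k : Nat => (pvKeyS (pvArgmax efd (pvGrp ecd (k : Int))), pvGrp ecd (k : Int))) := by
  induction j with
  | zero =>
    simp only [List.range_zero, List.foldl_nil, List.map_nil, List.append_nil, Nat.cast_zero]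
    congr 1
    rw [List.filter_eq_self.mpr]
    intro c hcmem
    simpa using hnn c ((pvCK_mem ecd c).mp hcmem)
  | succ j ih =>
    have hjN : j < N := hj
    have ihe := ih (Nat.le_of_lt hjN)
    rw [List.range_succ, List.foldl_append, List.foldl_cons, List.foldl_nil]
    rcases hD : (List.range j).foldl
        (fun d (k : Nat) => pvPopReinsert
          (PySem.Dict.mk ((pvCK ecd).map (fun c => (c, pvArgmax efd (pvGrp ecd c))))) d (k : Int))
        (PySem.Dict.mk ((pvCK ecd).map (fun c => (pvKeyI c, pvGrp ecd c)))) with D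
    rw [hD] at ihe
    have hjCK : (j : Int) ∈ pvCK ecd := (pvCK_mem ecd j).mpr (hcov j hjN)
    have hjS : (j : Int) ∈ (pvCK ecd).filter (fun c => decide ((j : Int) ≤ c)) :=
      List.mem_filter.mpr ⟨hjCK, by simp⟩
    -- get? finds group j in the unprocessed part
    have hget : D.get? (pvKeyI (j : Int)) = some (pvGrp ecd (j : Int)) := by
      show (D.items.find? (fun q => q.1 == pvKeyI (j : Int))).map (fun x => x.2) = _
      rw [ihe, List.find?_append, pvFind_keyI, if_pos hjS]
      have : ((List.range j).map
          (fun k : Nat => (pvKeyS (pvArgmax efd (pvGrp ecd (k : Int))), pvGrp ecd (k : Int)))).find?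
            (fun q => q.1 == pvKeyI (j : Int)) = none := by
        rw [List.find?_eq_none]
        intro q hq
        rcases List.mem_map.mp hq with ⟨k, _, rfl⟩
        simp [pvKeyS, pvKeyI]
      rw [this]
      rfl
    rw [pvPopReinsert, PySem.Dict.pop?, hget]
    simp only [Option.map_some]
    -- the popped dict
    have herase : (D.erase (pvKeyI (j : Int))).items
        = ((pvCK ecd).filter (fun c => decide (((j : Nat) + 1 : Int) ≤ c))).map
            (fun c => (pvKeyI c, pvGrp ecd c))
          ++ (List.range j).map
            (fun k : Nat => (pvKeyS (pvArgmax efd (pvGrp ecd (k : Int))), pvGrp ecd (k : Int))) := by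
      show (D.items.filter (fun q => !(q.1 == pvKeyI (j : Int)))) = _
      rw [ihe, List.filter_append]
      congr 1
      · rw [List.filter_map, List.filter_filter]
        congr 1
        apply List.filter_congr
        intro c _
        by_cases h : c = (j : Int)
        · subst h; simp [pvKeyI]
        · have hbeq : ((pvKeyI c == pvKeyI (j : Int)) : Bool) = false := by
            simp [pvKeyI, h]
          simp only [Function.comp_apply, hbeq, Bool.not_false, Bool.true_and,
            decide_eq_decide]
          omega
      · apply List.filter_eq_self.mpr
        intro q hq
        rcases List.mem_map.mp hq with ⟨k, _, rfl⟩
        simp [pvKeyS, pvKeyI]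
    -- parent name
    have hparent : (PySem.Dict.mk ((pvCK ecd).map
        (fun c => (c, pvArgmax efd (pvGrp ecd c))))).getD (j : Int) ""
          = pvArgmax efd (pvGrp ecd (j : Int)) := by
      rw [PySem.Dict.getD_eq_get?_getD, pvGet_int, if_pos hjCK]
      rfl
    -- the new key is fresh
    have hfresh : (D.erase (pvKeyI (j : Int))).contains
        (pvKeyS (pvArgmax efd (pvGrp ecd (j : Int)))) = false := by
      show ((D.erase (pvKeyI (j : Int))).items.any
        (fun q => q.1 == pvKeyS (pvArgmax efd (pvGrp ecd (j : Int))))) = false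
      rw [herase, List.any_eq_false]
      intro q hq
      rcases List.mem_append.mp hq with h | h
      · rcases List.mem_map.mp h with ⟨c, _, rfl⟩
        simp [pvKeyI, pvKeyS]
      · rcases List.mem_map.mp h with ⟨k, hk, rfl⟩
        have hkj : (k : Int) ≠ (j : Int) := by
          have := List.mem_range.mp hk; omega
        have hne := pvParent_ne efd ecd hnd hkj
          ((pvGrp_ne_nil_iff ecd _).mpr (hcov k (lt_trans (List.mem_range.mp hk) hjN)))
          ((pvGrp_ne_nil_iff ecd _).mpr (hcov j hjN))
        simp [pvKeyS, hne]
    rw [hparent, PySem.Dict.items_insert_of_not_contains _ _ hfresh, herase]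
    rw [List.map_append, List.append_assoc]
    congr 2

theorem pvA_eq (efd ecd : List (String × Int))
    (hpre : Pre_create_parent_dict efd ecd) :
    create_parent_dict efd ecd
      = (List.range (pvNumClusters ecd).toNat).map
          (fun k : Nat => (pvArgmax efd (pvGrp ecd (k : Int)), pvGrp ecd (k : Int))) := by
  obtain ⟨hnd, hne, hnn', hcov', -⟩ := hpre
  have hvals_ne : ecd.map Prod.snd ≠ [] := by simpa using hne
  have hnn : ∀ c ∈ ecd.map Prod.snd, 0 ≤ c := by
    intro c hc
    rcases List.mem_map.mp hc with ⟨p, hp, rfl⟩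
    exact hnn' p hp
  have hM0 : 0 ≤ (ecd.map Prod.snd).foldl max 0 := (PySem.List.le_foldl_max _ 0).1
  have hnum : pvNumClusters ecd = (ecd.map Prod.snd).foldl max 0 + 1 := by
    rw [pvNumClusters, pvNum_eq _ hvals_ne hnn]
  set N := (pvNumClusters ecd).toNat with hN
  have hNcast : ((N : Nat) : Int) = pvNumClusters ecd := by omega
  have hcov : ∀ k : Nat, k < N → (k : Int) ∈ ecd.map Prod.snd := by
    intro k hk
    exact hcov' k (List.mem_range.mpr (by omega))
  have hlt : ∀ c ∈ ecd.map Prod.snd, c < pvNumClusters ecd := by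
    intro c hc
    have := (PySem.List.le_foldl_max (ecd.map Prod.snd) 0).2 c hc
    omega
  have hrange : PySem.List.pyRange 0 (pvNumClusters ecd) 1
      = (List.range N).map (fun k : Nat => (k : Int)) := by
    rw [← hNcast, PySem.List.pyRange_zero_natCast]
  obtain ⟨h1, h2⟩ := pvPhase1 efd ecd
  have e1 : (ecd.foldl (pvStepA efd) (PySem.Dict.empty, PySem.Dict.empty)).1
      = PySem.Dict.mk ((pvCK ecd).map (fun c => (pvKeyI c, pvGrp ecd c))) := PySem.Dict.ext h1
  have e2 : (ecd.foldl (pvStepA efd) (PySem.Dict.empty, PySem.Dict.empty)).2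
      = PySem.Dict.mk ((pvCK ecd).map (fun c => (c, pvArgmax efd (pvGrp ecd c)))) := PySem.Dict.ext h2
  show ((PySem.List.pyRange 0 (pvNumClusters ecd) 1).foldl
      (pvPopReinsert (ecd.foldl (pvStepA efd) (PySem.Dict.empty, PySem.Dict.empty)).2)
      (ecd.foldl (pvStepA efd) (PySem.Dict.empty, PySem.Dict.empty)).1).items.map
        (fun q => (q.1.2.2, q.2)) = _
  rw [e1, e2, hrange, List.foldl_map]
  have hmain := pvPhase2 efd ecd hnd N hcov hnn N (le_refl N)
  rw [hmain]
  have hfilt : (pvCK ecd).filter (fun c => decide ((N : Int) ≤ c)) = [] := by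
    rw [List.filter_eq_nil_iff]
    intro c hc
    have := hlt c ((pvCK_mem ecd c).mp hc)
    simp only [decide_eq_true_eq]
    omega
  rw [hfilt]
  simp only [List.map_nil, List.nil_append, List.map_map]
  apply List.map_congr_left
  intro k _
  simp [pvKeyS]

theorem pvB_eq (efd ecd : List (String × Int))
    (hpre : Pre_create_parent_dict efd ecd) :
    create_parent_dict_alt efd ecd
      = (List.range (pvNumClusters ecd).toNat).map
          (fun k : Nat => (pvArgmax efd (pvGrp ecd (k : Int)), pvGrp ecd (k : Int))) := by
  obtain ⟨hnd, hne, hnn', hcov', -⟩ := hpre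
  have hvals_ne : ecd.map Prod.snd ≠ [] := by simpa using hne
  have hnn : ∀ c ∈ ecd.map Prod.snd, 0 ≤ c := by
    intro c hc
    rcases List.mem_map.mp hc with ⟨p, hp, rfl⟩
    exact hnn' p hp
  have hM0 : 0 ≤ (ecd.map Prod.snd).foldl max 0 := (PySem.List.le_foldl_max _ 0).1
  have hnum : pvNumClusters ecd = (ecd.map Prod.snd).foldl max 0 + 1 := by
    rw [pvNumClusters, pvNum_eq _ hvals_ne hnn]
  set N := (pvNumClusters ecd).toNat with hN
  have hNcast : ((N : Nat) : Int) = pvNumClusters ecd := by omega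
  have hcov : ∀ k : Nat, k < N → (k : Int) ∈ ecd.map Prod.snd := by
    intro k hk
    exact hcov' k (List.mem_range.mpr (by omega))
  have hrange : PySem.List.pyRange 0 (pvNumClusters ecd) 1
      = (List.range N).map (fun k : Nat => (k : Int)) := by
    rw [← hNcast, PySem.List.pyRange_zero_natCast]
  have hgroups : ∀ k : Int,
      ((ecd.foldl (fun g (p : String × Int) => g.modify p.2 [] (fun l => l ++ [p.1]))
        PySem.Dict.empty).get? k).getD [] = pvGrp ecd k := by
    intro k
    rw [← PySem.Dict.getD_eq_get?_getD]
    have : ecd.foldl (fun g (p : String × Int) => g.modify p.2 [] (fun l => l ++ [p.1]))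
        PySem.Dict.empty
      = (ecd.map (fun p => (p.2, p.1))).foldl
          (fun d q => d.modify q.1 [] (fun l => l ++ [q.2])) PySem.Dict.empty := by
      rw [List.foldl_map]
    rw [this, PySem.Dict.getD_foldl_modify_append]
    simp only [PySem.Dict.getD_empty, List.nil_append, List.filter_map, List.map_map]
    rfl
  show ((PySem.List.pyRange 0 (pvNumClusters ecd) 1).foldl (fun r k =>
      r.insert (pvArgmax efd (((ecd.foldl (fun g (p : String × Int) => g.modify p.2 [] (fun l => l ++ [p.1]))
        PySem.Dict.empty).get? k).getD []))
        (((ecd.foldl (fun g (p : String × Int) => g.modify p.2 [] (fun l => l ++ [p.1]))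
        PySem.Dict.empty).get? k).getD []))
    PySem.Dict.empty).items = _
  have hfun : (fun (r : PySem.Dict String (List String)) (k : Int) =>
      r.insert (pvArgmax efd (((ecd.foldl (fun g (p : String × Int) => g.modify p.2 [] (fun l => l ++ [p.1]))
        PySem.Dict.empty).get? k).getD []))
        (((ecd.foldl (fun g (p : String × Int) => g.modify p.2 [] (fun l => l ++ [p.1]))
        PySem.Dict.empty).get? k).getD []))
      = (fun r k => r.insert (pvArgmax efd (pvGrp ecd k)) (pvGrp ecd k)) := by
    funext r k
    rw [hgroups]
  rw [hfun, hrange, List.foldl_map]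
  rw [PySem.Dict.items_foldl_insert_fresh (List.range N)
      (fun k : Nat => pvArgmax efd (pvGrp ecd (k : Int)))
      (fun k : Nat => pvGrp ecd (k : Int)) PySem.Dict.empty
      (by intro a _; simp [PySem.Dict.contains_empty])
      ?nd]
  case nd =>
    apply List.Nodup.map_on
    · intro x hx y hy hxy
      by_contra hne'
      exact pvParent_ne efd ecd hnd (by exact_mod_cast hne')
        ((pvGrp_ne_nil_iff ecd _).mpr (hcov x (List.mem_range.mp hx)))
        ((pvGrp_ne_nil_iff ecd _).mpr (hcov y (List.mem_range.mp hy))) hxy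
    · exact List.nodup_range
  simp [PySem.Dict.empty]

-- ===== VERDICT (by name: the statement is the Claim_ definition above) =====
theorem create_parent_dict_spec : Claim_equal_create_parent_dict := by
  intro efd ecd _ hpre
  unfold Spec_create_parent_dict
  rw [pvA_eq efd ecd hpre, pvB_eq efd ecd hpre]
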